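-- pv_equiv track=rewrite | github.com/kdrzazga/python-tutorial | src/interview/InterviewTasks.py | find_unique_element
-- ===== SOURCE A (Python) =====
-- def find_unique_element(array):
--     frequency_map = {}
--     for element in array:
--         frequency_map[element] = frequency_map.get(element, 0) + 1
--
--     for key, value in frequency_map.items():
--         if 1 == value:
--             return key
--     return -1
-- ===== SOURCE B (Python) =====
-- def find_unique_element(array):
--     for element in array:
--         if array.count(element) == 1:
--             return element
--     return -1
-- ===== Notes on version B (the rewrite author's own statement) =====
-- stated objective: simpler
-- what changed: Replaces the frequency-dict build plus items scan with a single loop over the array that returns the first element whose array.count equals 1 (no map is built); the first such array element coincides with the first insertion-ordered dict key of count 1.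
import Mathlib
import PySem

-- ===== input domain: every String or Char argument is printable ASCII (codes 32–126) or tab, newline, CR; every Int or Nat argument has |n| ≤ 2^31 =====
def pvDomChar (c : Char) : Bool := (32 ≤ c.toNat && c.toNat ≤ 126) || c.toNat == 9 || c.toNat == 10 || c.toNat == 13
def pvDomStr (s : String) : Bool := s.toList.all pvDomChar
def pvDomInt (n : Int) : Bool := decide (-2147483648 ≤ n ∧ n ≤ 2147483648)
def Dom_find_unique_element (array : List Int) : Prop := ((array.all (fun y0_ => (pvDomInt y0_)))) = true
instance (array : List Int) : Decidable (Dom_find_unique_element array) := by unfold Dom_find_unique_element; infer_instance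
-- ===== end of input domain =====

-- B replaces A's frequency-dict-then-scan with a single in-order loop using array.count; same return value, simpler code (O(n^2) vs O(n)).

-- ===== PORT A =====
-- scan over frequency_map.items: first key with value 1, else -1
def pvItemsScan : List (Int × Int) → Int
  | [] => -1
  | (k, v) :: rest => if 1 = v then k else pvItemsScan rest

def find_unique_element (array : List Int) : Int :=
  let frequency_map :=
    array.foldl (fun d element => d.insert element (d.getD element 0 + 1)) PySem.Dict.empty
  pvItemsScan frequency_map.items

-- ===== PORT B =====
-- loop over array itself: first element whose total count is 1, else -1
def pvScanB (array : List Int) : List Int → Int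
  | [] => -1
  | x :: rest => if (array.count x : Int) = 1 then x else pvScanB array rest

def find_unique_element_alt (array : List Int) : Int := pvScanB array array

-- ===== PRECONDITION & SPEC =====
def Spec_find_unique_element (array : List Int) (out : Int) : Prop := out = find_unique_element_alt array
instance (array : List Int) (out : Int) : Decidable (Spec_find_unique_element array out) := by unfold Spec_find_unique_element; infer_instance

-- ===== CLAIM (what is proved, stated in full; the proofs are below) =====
def Claim_equal_find_unique_element : Prop := ∀ (array : List Int), Dom_find_unique_element array → Spec_find_unique_element array (find_unique_element array)

-- ===== LEMMAS AND PROOFS =====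

/-- Result of a first-match scan, phrased via `List.find?`. -/
def pvFind (p : Int → Bool) (l : List Int) : Int :=
  match l.find? p with
  | some x => x
  | none => -1

theorem pvFind?_congr (p q : Int → Bool) : ∀ (l : List Int), (∀ x ∈ l, p x = q x) →
    l.find? p = l.find? q := by
  intro l
  induction l with
  | nil => intro _; rfl
  | cons x t ih =>
    intro h
    have hx := h x (List.mem_cons_self)
    simp only [List.find?_cons, hx]
    cases hq : q x
    · simp only []
      exact ih (fun y hy => h y (List.mem_cons_of_mem x hy))
    · simp

theorem pvFind_ext (p q : Int → Bool) (l : List Int) (h : ∀ x ∈ l, p x = q x) :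
    pvFind p l = pvFind q l := by
  unfold pvFind
  rw [pvFind?_congr p q l h]

theorem pvItemsScan_map (c : Int → Int) (l : List Int) :
    pvItemsScan (l.map (fun k => (k, c k))) = pvFind (fun k => decide ((1 : Int) = c k)) l := by
  induction l with
  | nil => rfl
  | cons x t ih =>
    simp only [List.map_cons, pvItemsScan, pvFind, List.find?_cons]
    by_cases h : (1 : Int) = c x
    · simp [h]
    · simp only [h, decide_false]
      exact ih

theorem pvScanB_eq_pvFind (array l : List Int) :
    pvScanB array l = pvFind (fun x => decide ((array.count x : Int) = 1)) l := by
  induction l with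
  | nil => rfl
  | cons x t ih =>
    simp only [pvScanB, pvFind, List.find?_cons]
    by_cases h : (array.count x : Int) = 1
    · simp [h]
    · simp only [h, decide_false]
      exact ih

/-- Key lemma: a first-match search over the accumulated set equals the search over the
    seen elements then over the remaining list restricted to unseen elements. -/
theorem find?_foldl_add (p : Int → Bool) (l : List Int) :
    ∀ (s : List Int),
      ((l.foldl PySem.Set.add s).find? p)
        = (s.find? p).or (l.find? (fun x => p x && !decide (x ∈ s))) := by
  induction l with
  | nil => intro s; simp
  | cons x t ih =>
    intro s
    simp only [List.foldl_cons, List.find?_cons]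
    by_cases hmem : x ∈ s
    · have hadd : PySem.Set.add s x = s := by
        simp [PySem.Set.add, PySem.Set.contains, hmem]
      rw [hadd, ih s]
      simp [hmem]
    · have hadd : PySem.Set.add s x = s ++ [x] := by
        simp [PySem.Set.add, PySem.Set.contains, hmem]
      rw [hadd, ih (s ++ [x]), List.find?_append]
      by_cases hpx : p x
      · cases hfs : List.find? p s <;> simp [hpx, hmem]
      · have hpred : ∀ y ∈ t, (p y && !decide (y ∈ s ++ [x])) = (p y && !decide (y ∈ s)) := by
          intro y _
          by_cases hxy : y = x
          · subst hxy
            have : p y = false := by simpa using hpx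
            simp [this]
          · simp [hxy]
        rw [pvFind?_congr _ _ t hpred]
        simp [hpx]

theorem pvFind_dedup (p : Int → Bool) (l : List Int) :
    pvFind p (PySem.Set.ofList l) = pvFind p l := by
  unfold pvFind
  rw [PySem.Set.ofList_eq_foldl, find?_foldl_add p l []]
  have h : ∀ x ∈ l, (p x && !decide (x ∈ ([] : List Int))) = p x := by
    intro x _; simp
  rw [pvFind?_congr _ _ l h]
  simp

-- ===== VERDICT (by name: the statement is the Claim_ definition above) =====
theorem find_unique_element_spec : Claim_equal_find_unique_element := by
  intro array _
  show find_unique_element array = find_unique_element_alt array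
  simp only [find_unique_element, find_unique_element_alt,
    PySem.Dict.foldl_insert_getD_add_one_eq_counter]
  rw [PySem.Dict.items_counter, pvItemsScan_map, pvScanB_eq_pvFind, pvFind_dedup]
  apply pvFind_ext
  intro x _
  simp [eq_comm]
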